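-- pv_equiv track=rewrite | github.com/tianren/psm | psm.py | combination_num
-- ===== SOURCE A (Python) =====
-- def factorial(k):
--     res = 1
--     for _k in range(1,k+1):
--         res *= _k
--     return res
--
-- def combination_num(shapes):
--     n = sum(shapes)
--     res = factorial(n)
--     p,c = 0,0
--     for s in shapes:
--         res //= factorial(s)
--         if s == p:
--             c += 1
--             res //= c
--         else:
--             p,c = s,1
--     return res
-- ===== SOURCE B (Python) =====
-- # Alternative decomposition: one closed-form floor division num // den, where den is the
-- # product of factorials of the shapes times the symmetry factor of maximal adjacent runs,
-- # instead of A's incremental floored divisions.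
--
-- def _fact(k):
--     r = 1
--     while k > 1:
--         r *= k
--         k -= 1
--     return r
--
-- def _runs(xs):
--     # maximal runs of adjacent-equal values, as (value, length) pairs
--     runs = []
--     i = 0
--     m = len(xs)
--     while i < m:
--         j = i + 1
--         while j < m and xs[j] == xs[i]:
--             j += 1
--         runs.append((xs[i], j - i))
--         i = j
--     return runs
--
-- def combination_num(shapes):
--     num = _fact(sum(shapes))
--     den = 1
--     for s in shapes:
--         den *= _fact(s)
--     for _, r in _runs(shapes):
--         den *= _fact(r)
--     return num // den
-- ===== Notes on version B (the rewrite author's own statement) =====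
-- stated objective: alternative
-- what changed: B replaces A's single pass of incremental floored divisions with stateful (prev,count) tracking by one closed-form floor division num // den, where den is the product of factorials of the shapes multiplied by the symmetry factor computed from maximal adjacent runs found by a recursive run-splitter.
import Mathlib
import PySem

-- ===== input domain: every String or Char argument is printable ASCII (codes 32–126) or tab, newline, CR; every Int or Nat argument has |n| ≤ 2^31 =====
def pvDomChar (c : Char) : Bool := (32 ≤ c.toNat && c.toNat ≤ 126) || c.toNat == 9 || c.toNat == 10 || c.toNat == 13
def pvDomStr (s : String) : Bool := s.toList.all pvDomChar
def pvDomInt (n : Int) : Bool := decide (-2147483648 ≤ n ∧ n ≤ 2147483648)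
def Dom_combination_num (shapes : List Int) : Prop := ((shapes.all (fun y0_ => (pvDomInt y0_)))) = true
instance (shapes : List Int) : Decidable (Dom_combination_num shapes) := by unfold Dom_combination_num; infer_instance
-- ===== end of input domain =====

-- B replaces A's incremental floored divisions with one closed-form division
-- num // den (den = product of factorials times run-symmetry factor); objective: alternative.

-- ===== PORT A =====
def pyFactorial (k : Int) : Int :=
  (PySem.List.pyRange 1 (k + 1) 1).foldl (fun res _k => res * _k) 1

def stepA (st : Int × Int × Int) (s : Int) : Int × Int × Int :=
  let res := PySem.Int.floordiv st.1 (pyFactorial s)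
  if s = st.2.1 then (PySem.Int.floordiv res (st.2.2 + 1), st.2.1, st.2.2 + 1)
  else (res, s, 1)

def combination_num (shapes : List Int) : Int :=
  let n := shapes.sum
  let res := pyFactorial n
  (shapes.foldl stepA (res, 0, 0)).1

-- ===== PORT B =====
def bFactAux (r k : Int) : Int :=
  if 1 < k then bFactAux (r * k) (k - 1) else r
termination_by k.toNat
decreasing_by omega

def bFact (k : Int) : Int := bFactAux 1 k

-- cited by the decreasing_by proofs of the while-loop recursions below
theorem pvDecInner (L j : Int) (h : j < L) : (L - (j + 1)).toNat < (L - j).toNat := by omega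

theorem pvDecOuter (L i j : Int) (hi : i < L) (hj : i + 1 ≤ j) : (L - j).toNat < (L - i).toNat := by
  omega

def runsInner (xs : List Int) (i j : Int) : Int :=
  if j < PySem.List.len xs ∧ PySem.List.pyGetD xs j 0 = PySem.List.pyGetD xs i 0 then
    runsInner xs i (j + 1)
  else j
termination_by (PySem.List.len xs - j).toNat
decreasing_by rename_i h; exact pvDecInner _ _ h.1

-- cited by runsOuter's decreasing_by (the inner while never moves j backwards)
theorem runsInner_ge (xs : List Int) (i j : Int) : j ≤ runsInner xs i j := by
  induction j using runsInner.induct xs i with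
  | case1 j h ih => rw [runsInner, if_pos h]; omega
  | case2 j h => rw [runsInner, if_neg h]

def runsOuter (xs : List Int) (runs : List (Int × Int)) (i : Int) : List (Int × Int) :=
  if i < PySem.List.len xs then
    let j := runsInner xs i (i + 1)
    runsOuter xs (runs ++ [(PySem.List.pyGetD xs i 0, j - i)]) j
  else runs
termination_by (PySem.List.len xs - i).toNat
decreasing_by rename_i h; exact pvDecOuter _ _ _ h (runsInner_ge xs i (i + 1))

def runsB (xs : List Int) : List (Int × Int) := runsOuter xs [] 0

def combination_num_alt (shapes : List Int) : Int :=
  let num := bFact shapes.sum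
  let den := shapes.foldl (fun den s => den * bFact s) 1
  let den := (runsB shapes).foldl (fun den pr => den * bFact pr.2) den
  PySem.Int.floordiv num den

-- ===== PRECONDITION & SPEC =====
def Spec_combination_num (shapes : List Int) (out : Int) : Prop := out = combination_num_alt shapes
instance (shapes : List Int) (out : Int) : Decidable (Spec_combination_num shapes out) := by unfold Spec_combination_num; infer_instance

-- ===== CLAIM (what is proved, stated in full; the proofs are below) =====
def Claim_equal_combination_num : Prop := ∀ (shapes : List Int), Dom_combination_num shapes → Spec_combination_num shapes (combination_num shapes)

-- ===== LEMMAS AND PROOFS =====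

-- recursive factorial: proof-side description of B's countdown loop bFactAux
def factRec (k : Int) : Int :=
  if k ≤ 1 then 1 else k * factRec (k - 1)
termination_by k.toNat
decreasing_by omega

theorem bFactAux_eq (r k : Int) : bFactAux r k = r * factRec k := by
  induction r, k using bFactAux.induct with
  | case1 r k h ih =>
    rw [bFactAux, factRec]
    simp only [if_pos h, if_neg (by omega : ¬ k ≤ 1), ih]
    ring
  | case2 r k h =>
    rw [bFactAux, factRec]
    simp only [if_neg h, if_pos (by omega : k ≤ 1)]
    ring

theorem bFact_eq (k : Int) : bFact k = factRec k := by
  rw [bFact, bFactAux_eq]; ring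

theorem factRec_pos (k : Int) : 0 < factRec k := by
  induction k using factRec.induct with
  | case1 k h => rw [factRec]; simp [h]
  | case2 k h ih => rw [factRec]; simp only [if_neg h]; exact mul_pos (by omega) ih

theorem bFact_pos (k : Int) : 0 < bFact k := by rw [bFact_eq]; exact factRec_pos k

theorem bFact_one : bFact 1 = 1 := by rw [bFact_eq, factRec]; simp

theorem bFact_succ (k : Int) (h : 2 ≤ k) : bFact k = k * bFact (k - 1) := by
  rw [bFact_eq, bFact_eq, factRec]; simp [show ¬ k ≤ 1 by omega]

theorem pyFactorial_eq_aux : ∀ (n : Nat) (k : Int), k.toNat ≤ n → pyFactorial k = bFact k := by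
  intro n
  induction n with
  | zero =>
    intro k hk
    have hk0 : k ≤ 0 := by omega
    rw [pyFactorial, bFact_eq, factRec, PySem.List.pyRange_one_eq_nil (by omega)]
    simp [show k ≤ 1 by omega]
  | succ n ih =>
    intro k hk
    by_cases h0 : k ≤ 0
    · rw [pyFactorial, bFact_eq, factRec, PySem.List.pyRange_one_eq_nil (by omega)]
      simp [show k ≤ 1 by omega]
    · have h1 : 1 ≤ k := by omega
      have hsplit : PySem.List.pyRange 1 (k + 1) 1 = PySem.List.pyRange 1 k 1 ++ [k] :=
        PySem.List.pyRange_one_succ_right h1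
      have hrec : pyFactorial k = pyFactorial (k - 1) * k := by
        rw [pyFactorial, hsplit, List.foldl_append, pyFactorial]
        norm_num
      by_cases h2 : k = 1
      · subst h2; rw [bFact_one]; decide
      · rw [hrec, ih (k - 1) (by omega), bFact_succ k (by omega)]; ring

theorem pyFactorial_eq (k : Int) : pyFactorial k = bFact k :=
  pyFactorial_eq_aux k.toNat k le_rfl

theorem pyFactorial_pos (k : Int) : 0 < pyFactorial k := by
  rw [pyFactorial_eq]; exact bFact_pos k

-- denominator accumulated by A's loop (no divisions)
def divA : Int → Int → List Int → Int
  | _, _, [] => 1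
  | p, c, s :: t =>
    pyFactorial s * (if s = p then (c + 1) * divA p (c + 1) t else divA s 1 t)

-- the run-symmetry part of divA alone
def runProd : Int → Int → List Int → Int
  | _, _, [] => 1
  | p, c, s :: t => if s = p then (c + 1) * runProd p (c + 1) t else runProd s 1 t

theorem runProd_pos : ∀ (l : List Int) (p c : Int), 0 ≤ c → 0 < runProd p c l := by
  intro l
  induction l with
  | nil => intro p c _; simp [runProd]
  | cons s t ih =>
    intro p c hc
    simp only [runProd]
    split
    · exact mul_pos (by omega) (ih p (c + 1) (by omega))
    · exact ih s 1 (by omega)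

theorem divA_eq : ∀ (l : List Int) (p c : Int),
    divA p c l = (l.map pyFactorial).prod * runProd p c l := by
  intro l
  induction l with
  | nil => intro p c; simp [divA, runProd]
  | cons s t ih =>
    intro p c
    simp only [divA, runProd, List.map_cons, List.prod_cons]
    split
    · rw [ih p (c + 1)]; ring
    · rw [ih s 1]; ring

theorem divA_pos (l : List Int) (p c : Int) (hc : 0 ≤ c) : 0 < divA p c l := by
  rw [divA_eq]
  exact mul_pos (List.prod_pos (by intro x hx; simp at hx; obtain ⟨y, _, hy⟩ := hx; rw [← hy]; exact pyFactorial_pos y)) (runProd_pos l p c hc)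

theorem fd_one (x : Int) : PySem.Int.floordiv x 1 = x := by
  rw [PySem.Int.floordiv_eq_ediv_of_pos (by omega)]; exact Int.ediv_one x

theorem fd_fd (x a b : Int) (ha : 0 < a) (hb : 0 < b) :
    PySem.Int.floordiv (PySem.Int.floordiv x a) b = PySem.Int.floordiv x (a * b) := by
  rw [PySem.Int.floordiv_eq_ediv_of_pos ha, PySem.Int.floordiv_eq_ediv_of_pos hb,
      PySem.Int.floordiv_eq_ediv_of_pos (mul_pos ha hb)]
  exact Int.ediv_ediv_of_nonneg (by omega)

theorem loopA_fst : ∀ (l : List Int) (p c res : Int), 0 ≤ c →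
    (l.foldl stepA (res, p, c)).1 = PySem.Int.floordiv res (divA p c l) := by
  intro l
  induction l with
  | nil => intro p c res _; simp only [List.foldl_nil, divA]; exact (fd_one res).symm
  | cons s t ih =>
    intro p c res hc
    simp only [List.foldl_cons, stepA, divA]
    by_cases hsp : s = p
    · simp only [if_pos hsp]
      rw [ih p (c + 1) _ (by omega),
          fd_fd _ _ _ (pyFactorial_pos s) (by omega),
          fd_fd _ _ _ (mul_pos (pyFactorial_pos s) (by omega)) (divA_pos t p (c + 1) (by omega))]
      ring_nf
    · simp only [if_neg hsp]
      rw [ih s 1 _ (by omega), fd_fd _ _ _ (pyFactorial_pos s) (divA_pos t s 1 (by omega))]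

-- proof-side description of B's index-based run scan: recursive run splitting
def leadRun (h : Int) : List Int → Int × List Int
  | [] => (0, [])
  | x :: t =>
    if x = h then
      let p := leadRun h t
      (1 + p.1, p.2)
    else (0, x :: t)

theorem leadRun_rest_length (h : Int) (t : List Int) : (leadRun h t).2.length ≤ t.length := by
  induction t with
  | nil => simp [leadRun]
  | cons x t ih =>
    simp only [leadRun]
    split
    · exact Nat.le_succ_of_le ih
    · simp

def runsSpec (xs : List Int) : List (Int × Int) :=
  match xs with
  | [] => []
  | x :: t => (x, 1 + (leadRun x t).1) :: runsSpec (leadRun x t).2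
termination_by xs.length
decreasing_by exact Nat.lt_succ_of_le (leadRun_rest_length x t)

-- the inner while scans exactly the leading run of xs[i]'s value in the suffix after j
theorem runsInner_eq (xs : List Int) (i : Int) : ∀ j, 0 ≤ j → j ≤ (xs.length : Int) →
    runsInner xs i j = j + (leadRun (PySem.List.pyGetD xs i 0) (xs.drop j.toNat)).1 ∧
    xs.drop (runsInner xs i j).toNat = (leadRun (PySem.List.pyGetD xs i 0) (xs.drop j.toNat)).2 := by
  intro j
  induction j using runsInner.induct xs i with
  | case1 j h ih =>
    intro hj0 hjlen
    obtain ⟨hjlt, hget⟩ := h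
    rw [PySem.List.len_eq] at hjlt
    have hdrop : xs.drop j.toNat = xs[j.toNat] :: xs.drop (j.toNat + 1) :=
      List.drop_eq_getElem_cons (by omega)
    have hx : xs[j.toNat] = PySem.List.pyGetD xs i 0 := by
      rw [← PySem.List.pyGetD_eq_getElem xs 0 hj0 hjlt]; exact hget
    have ih' := ih (by omega) (by omega)
    have hcond : runsInner xs i j = runsInner xs i (j + 1) := by
      rw [runsInner, if_pos ⟨by rw [PySem.List.len_eq]; exact hjlt, hget⟩]
    have hc : ((j : Int) + 1).toNat = j.toNat + 1 := by omega
    rw [hc] at ih'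
    rw [hcond, hdrop]
    simp only [leadRun, if_pos hx]
    exact ⟨by rw [ih'.1]; ring, ih'.2⟩
  | case2 j h =>
    intro hj0 hjlen
    rw [runsInner, if_neg h]
    by_cases hjl : j < (xs.length : Int)
    · have hdrop : xs.drop j.toNat = xs[j.toNat] :: xs.drop (j.toNat + 1) :=
        List.drop_eq_getElem_cons (by omega)
      have hne : ¬ xs[j.toNat] = PySem.List.pyGetD xs i 0 := by
        intro he
        exact h ⟨by rw [PySem.List.len_eq]; exact hjl,
                 by rw [PySem.List.pyGetD_eq_getElem xs 0 hj0 hjl]; exact he⟩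
      rw [hdrop]
      simp only [leadRun, if_neg hne]
      simp
    · have hd : xs.drop j.toNat = [] := List.drop_eq_nil_of_le (by omega)
      rw [hd]
      simp [leadRun]

-- the outer while appended exactly runsSpec of the remaining suffix
theorem runsOuter_eq : ∀ (n : Nat) (xs : List Int) (i : Int) (acc : List (Int × Int)),
    0 ≤ i → (xs.drop i.toNat).length ≤ n →
    runsOuter xs acc i = acc ++ runsSpec (xs.drop i.toNat) := by
  intro n
  induction n with
  | zero =>
    intro xs i acc hi hlen
    have hd : xs.drop i.toNat = [] := by
      cases h : xs.drop i.toNat with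
      | nil => rfl
      | cons a t => rw [h] at hlen; simp at hlen
    have hge : ¬ i < PySem.List.len xs := by
      rw [PySem.List.len_eq]
      have := List.length_drop (l := xs) (i := i.toNat)
      rw [hd] at this
      simp at this
      omega
    rw [runsOuter, if_neg hge, hd, runsSpec]
    simp
  | succ n ih =>
    intro xs i acc hi hlen
    by_cases hlt : i < PySem.List.len xs
    · have hltl : i < (xs.length : Int) := by rw [PySem.List.len_eq] at hlt; exact hlt
      have hdrop : xs.drop i.toNat = xs[i.toNat] :: xs.drop (i.toNat + 1) :=
        List.drop_eq_getElem_cons (by omega)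
      have hv : PySem.List.pyGetD xs i 0 = xs[i.toNat] :=
        PySem.List.pyGetD_eq_getElem xs 0 hi hltl
      have hI := runsInner_eq xs i (i + 1) (by omega) (by omega)
      have hc : ((i : Int) + 1).toNat = i.toNat + 1 := by omega
      rw [hc] at hI
      rw [runsOuter, if_pos hlt]
      have hj0 : (0 : Int) ≤ runsInner xs i (i + 1) :=
        le_trans (by omega) (runsInner_ge xs i (i + 1))
      have hlen' : (xs.drop (runsInner xs i (i + 1)).toNat).length ≤ n := by
        rw [hI.2]
        have h1 := leadRun_rest_length (PySem.List.pyGetD xs i 0) (xs.drop (i.toNat + 1))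
        have h2 : (xs.drop (i.toNat + 1)).length = xs.length - (i.toNat + 1) :=
          List.length_drop
        have h3 : (xs.drop i.toNat).length = xs.length - i.toNat := List.length_drop
        omega
      rw [ih xs (runsInner xs i (i + 1)) _ hj0 hlen', List.append_assoc]
      congr 1
      rw [hdrop]
      simp only [runsSpec, hI.2, hv, List.singleton_append, List.cons.injEq, Prod.mk.injEq,
        true_and, and_true]
      rw [hI.1, hv]
      ring
    · have hd : xs.drop i.toNat = [] := by
        apply List.drop_eq_nil_of_le
        rw [PySem.List.len_eq] at hlt
        omega
      rw [runsOuter, if_neg hlt, hd, runsSpec]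
      simp

theorem runsB_eq (xs : List Int) : runsB xs = runsSpec xs := by
  rw [runsB, runsOuter_eq xs.length xs 0 [] le_rfl (by simp)]
  simp

-- runProd started fresh (value of the loop on the first element of a run)
def afterFresh : List Int → Int
  | [] => 1
  | s :: t => runProd s 1 t

theorem leadRun_split : ∀ (t : List Int) (h c : Int), 1 ≤ c →
    runProd h c t * bFact c = bFact (c + (leadRun h t).1) * afterFresh (leadRun h t).2 := by
  intro t
  induction t with
  | nil => intro h c _; simp [runProd, leadRun, afterFresh]
  | cons x t ih =>
    intro h c hc
    by_cases hx : x = h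
    · subst hx
      have hb : bFact (c + 1) = (c + 1) * bFact c := by
        rw [bFact_succ (c + 1) (by omega)]; norm_num
      have ihc := ih x (c + 1) (by omega)
      simp only [leadRun, runProd, reduceIte]
      have harg : c + (1 + (leadRun x t).1) = (c + 1) + (leadRun x t).1 := by ring
      rw [harg, ← ihc, hb]
      ring
    · simp only [leadRun, runProd, if_neg hx, afterFresh]
      simp [mul_comm]

theorem afterFresh_eq_runs : ∀ (n : Nat) (l : List Int), l.length ≤ n →
    afterFresh l = ((runsSpec l).map (fun pr => bFact pr.2)).prod := by
  intro n
  induction n with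
  | zero =>
    intro l hl
    have : l = [] := List.eq_nil_of_length_eq_zero (by omega)
    subst this; simp [afterFresh, runsSpec]
  | succ n ih =>
    intro l hl
    match l with
    | [] => simp [afterFresh, runsSpec]
    | x :: t =>
      have hsplit := leadRun_split t x 1 le_rfl
      rw [bFact_one, mul_one] at hsplit
      have hrest : (leadRun x t).2.length ≤ n := by
        have := leadRun_rest_length x t
        simp at hl; omega
      rw [runsSpec]
      simp only [afterFresh, List.map_cons, List.prod_cons]
      rw [hsplit, ih _ hrest]

theorem runProd_zero_zero (l : List Int) : runProd 0 0 l = afterFresh l := by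
  match l with
  | [] => simp [runProd, afterFresh]
  | s :: t =>
    simp only [runProd, afterFresh]
    by_cases hs : s = 0
    · subst hs; simp
    · simp [hs]

theorem foldl_mul_eq {α : Type} (f : α → Int) : ∀ (l : List α) (a : Int),
    l.foldl (fun d s => d * f s) a = a * (l.map f).prod := by
  intro l
  induction l with
  | nil => simp
  | cons x t ih => intro a; simp only [List.foldl_cons, List.map_cons, List.prod_cons, ih]; ring

-- ===== VERDICT (by name: the statement is the Claim_ definition above) =====
theorem combination_num_spec : Claim_equal_combination_num := by
  intro shapes _
  unfold Spec_combination_num combination_num combination_num_alt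
  simp only []
  rw [runsB_eq, loopA_fst shapes 0 0 _ le_rfl, divA_eq, runProd_zero_zero, afterFresh_eq_runs shapes.length _ le_rfl]
  rw [foldl_mul_eq, foldl_mul_eq, pyFactorial_eq]
  have hm : shapes.map pyFactorial = shapes.map bFact := List.map_congr_left (fun x _ => pyFactorial_eq x)
  rw [hm]
  ring_nf
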